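-- pv_equiv track=rewrite | github.com/b-i-king/Video_Game_Stats_Tracker | utils/chart_utils.py | abbreviate_game_mode
-- ===== SOURCE A (Python) =====
-- def abbreviate_game_mode(game_mode):
--     """
--     Create a short display tag from a game mode name.
--     Takes the first letter of each word, uppercased.
--     Returns None for empty or generic modes ('Main', 'N/A').
--
--     Examples:
--         'Zombies'         → 'Z'
--         'Team Deathmatch' → 'TD'
--         'Battle Royale'   → 'BR'
--         'Main'            → None
--     """
--     if not game_mode or not game_mode.strip():
--         return None
--     clean = game_mode.strip()
--     if clean.lower() in ('main', 'n/a', 'none', '-'):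
--         return None
--     words = clean.replace('-', ' ').replace('_', ' ').split()
--     if not words:
--         return None
--     return ''.join(w[0].upper() for w in words if w) or None
-- ===== SOURCE B (Python) =====
-- def abbreviate_game_mode(game_mode):
--     if game_mode is None:
--         return None
--     s = game_mode.strip()
--     if not s or s.lower() in ('main', 'n/a', 'none', '-'):
--         return None
--     letters = []
--     prev_sep = True
--     for c in s:
--         if c.isspace() or c in '-_':
--             prev_sep = True
--         else:
--             if prev_sep:
--                 letters.append(c.upper())
--             prev_sep = False
--     return ''.join(letters) or None
-- ===== Notes on version B (the rewrite author's own statement) =====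
-- stated objective: simpler
-- what changed: Replaces the two-replace/split/per-word-comprehension pipeline by a single character scan with a previous-separator flag that emits each word's uppercased first letter directly.
import Mathlib
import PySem

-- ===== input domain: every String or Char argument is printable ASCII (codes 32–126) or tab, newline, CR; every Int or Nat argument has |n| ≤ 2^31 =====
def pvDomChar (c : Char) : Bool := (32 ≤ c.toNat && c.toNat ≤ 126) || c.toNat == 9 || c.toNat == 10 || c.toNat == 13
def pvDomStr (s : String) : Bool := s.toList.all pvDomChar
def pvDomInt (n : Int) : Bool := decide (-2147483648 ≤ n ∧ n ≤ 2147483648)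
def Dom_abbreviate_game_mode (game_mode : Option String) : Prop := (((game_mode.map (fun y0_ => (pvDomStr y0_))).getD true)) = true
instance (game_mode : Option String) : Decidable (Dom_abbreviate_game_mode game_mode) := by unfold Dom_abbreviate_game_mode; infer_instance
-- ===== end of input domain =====

-- B replaces A's two-replace/split/comprehension pipeline by a single character scan
-- with a prev_sep flag (simpler, one pass); return values proved equal on all inputs.


-- ===== PORT A =====
-- w[0].upper() as a one-character string; the "" branch is the (never reached) IndexError side
def pvFirstUpper (w : String) : String :=
  match PySem.List.pyGet? w.toList 0 with
  | some c => String.ofList [PySem.Chars.upperChar c]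
  | none => ""

def abbreviate_game_mode (game_mode : Option String) : Option String :=
  match game_mode with
  | none => none
  | some gm =>
    if gm = "" ∨ PySem.Str.strip gm = "" then none
    else
      let clean := PySem.Str.strip gm
      if PySem.Str.lower clean ∈ ["main", "n/a", "none", "-"] then none
      else
        let words := PySem.Str.split₀ (PySem.Str.replace (PySem.Str.replace clean "-" " ") "_" " ")
        if words = [] then none
        else
          let res := PySem.Str.join "" ((words.filter (fun w => w ≠ "")).map pvFirstUpper)
          if res = "" then none else some res

-- ===== PORT B =====
def pvIsSep (c : Char) : Bool := PySem.Chars.isspace c || c = '-' || c = '_'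

-- one step of the scan: state = (prev_sep, letters collected so far, reversed)
def pvScanStep (st : Bool × List Char) (c : Char) : Bool × List Char :=
  if pvIsSep c then (true, st.2)
  else if st.1 then (false, PySem.Chars.upperChar c :: st.2) else (false, st.2)

def abbreviate_game_mode_alt (game_mode : Option String) : Option String :=
  match game_mode with
  | none => none
  | some gm =>
    let s := PySem.Str.strip gm
    if s = "" ∨ PySem.Str.lower s ∈ ["main", "n/a", "none", "-"] then none
    else
      let letters := (s.toList.foldl pvScanStep (true, [])).2.reverse
      if letters = [] then none else some (String.ofList letters)

-- ===== PRECONDITION & SPEC =====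
def Spec_abbreviate_game_mode (game_mode : Option String) (out : Option String) : Prop := out = abbreviate_game_mode_alt game_mode
instance (game_mode : Option String) (out : Option String) : Decidable (Spec_abbreviate_game_mode game_mode out) := by unfold Spec_abbreviate_game_mode; infer_instance

-- ===== CLAIM (what is proved, stated in full; the proofs are below) =====
def Claim_equal_abbreviate_game_mode : Prop := ∀ (game_mode : Option String), Dom_abbreviate_game_mode game_mode → Spec_abbreviate_game_mode game_mode (abbreviate_game_mode game_mode)

-- ===== LEMMAS AND PROOFS =====

-- the specification both sides are reduced to: first letter of each separator-delimited word, uppercased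
def pvInitials (presep : Bool) : List Char → List Char
  | [] => []
  | c :: rest =>
    if pvIsSep c then pvInitials true rest
    else if presep then PySem.Chars.upperChar c :: pvInitials false rest
    else pvInitials false rest

-- same, with whitespace as the only separator (A's list after the two replaces)
def pvInitialsW (presep : Bool) : List Char → List Char
  | [] => []
  | c :: rest =>
    if PySem.Chars.isspace c then pvInitialsW true rest
    else if presep then PySem.Chars.upperChar c :: pvInitialsW false rest
    else pvInitialsW false rest

-- A's '-'/'_' → ' ' substitution, per character
def pvSub (c : Char) : Char := if c = '-' then ' ' else if c = '_' then ' ' else c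

-- A's join of uppercased first letters, at the List Char level
def pvG (ws : List (List Char)) : List Char :=
  (ws.filter (fun w => w ≠ [])).flatMap (fun w => match w with | [] => [] | c :: _ => [PySem.Chars.upperChar c])

def pvHd (cur : List Char) : List Char :=
  match cur.getLast? with | some c => [PySem.Chars.upperChar c] | none => []

theorem pvG_append (xs ys : List (List Char)) : pvG (xs ++ ys) = pvG xs ++ pvG ys := by
  simp [pvG, List.filter_append]

theorem pvG_singleton (c : Char) (t : List Char) : pvG [c :: t] = [PySem.Chars.upperChar c] := by
  simp [pvG]

-- single-character replace is a map
theorem replace_go_single (o n : Char) (l : List Char) : ∀ (fuel : Nat) (acc : List Char),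
    l.length ≤ fuel →
    PySem.Chars.replace.go [o] [n] fuel l acc
      = acc.reverse ++ l.map (fun c => if c = o then n else c) := by
  induction l with
  | nil => intro fuel acc _; cases fuel <;> simp [PySem.Chars.replace.go]
  | cons c t ih =>
    intro fuel acc h
    cases fuel with
    | zero => simp at h
    | succ f =>
      by_cases hc : c = o
      · have hp : List.isPrefixOf [o] (c :: t) = true := by simp [List.isPrefixOf, hc]
        simp only [PySem.Chars.replace.go, hp]
        rw [show List.drop (List.length [o]) (c :: t) = t by simp]
        rw [ih f (List.reverse [n] ++ acc) (by simpa using h)]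
        simp [hc]
      · have hp : List.isPrefixOf [o] (c :: t) = false := by
          simp [List.isPrefixOf]; exact fun h' => (hc h'.symm).elim
        simp only [PySem.Chars.replace.go, hp]
        rw [if_neg (by simp)]
        rw [ih f (c :: acc) (by simpa using h)]
        simp [hc]

theorem replace_single (o n : Char) (l : List Char) :
    PySem.Chars.replace l [o] [n] = l.map (fun c => if c = o then n else c) := by
  simp [PySem.Chars.replace]
  simpa using replace_go_single o n l l.length [] le_rfl

-- characterisation of split₀.go through pvG / pvInitialsW
theorem split_go_char : ∀ (s cur : List Char) (acc : List (List Char)),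
    pvG (PySem.Chars.split₀.go s cur acc)
      = pvG acc.reverse ++ pvHd cur ++ pvInitialsW cur.isEmpty s := by
  intro s
  induction s with
  | nil =>
    intro cur acc
    by_cases hc : cur = []
    · subst hc; simp [PySem.Chars.split₀.go, pvHd, pvInitialsW]
    · have : cur.isEmpty = false := by simpa [List.isEmpty_iff] using hc
      simp only [PySem.Chars.split₀.go, this, Bool.false_eq_true, pvInitialsW]
      rw [if_neg not_false]
      rw [show (cur.reverse :: acc).reverse = acc.reverse ++ [cur.reverse] by simp]
      rw [pvG_append]
      obtain ⟨c, t, hct⟩ := List.exists_cons_of_ne_nil (by simpa using hc : cur.reverse ≠ [])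
      have hlast : cur.getLast? = some c := by
        rw [← List.head?_reverse, hct]; rfl
      simp [hct, pvG_singleton, pvHd, hlast]
  | cons c rest ih =>
    intro cur acc
    by_cases hsp : PySem.Chars.isspace c = true
    · by_cases hc : cur = []
      · subst hc
        simp only [PySem.Chars.split₀.go, hsp, if_pos, List.isEmpty_nil]
        rw [ih [] acc]
        simp [pvHd, pvInitialsW, hsp]
      · have he : cur.isEmpty = false := by simpa [List.isEmpty_iff] using hc
        simp only [PySem.Chars.split₀.go, hsp, if_pos, he, Bool.false_eq_true]
        rw [if_neg not_false]
        rw [ih [] (cur.reverse :: acc)]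
        rw [show (cur.reverse :: acc).reverse = acc.reverse ++ [cur.reverse] by simp]
        rw [pvG_append]
        obtain ⟨d, t, hct⟩ := List.exists_cons_of_ne_nil (by simpa using hc : cur.reverse ≠ [])
        have hlast : cur.getLast? = some d := by rw [← List.head?_reverse, hct]; rfl
        simp [hct, pvG_singleton, pvHd, hlast, pvInitialsW, hsp]
    · have hsp' : PySem.Chars.isspace c = false := by simpa using hsp
      simp only [PySem.Chars.split₀.go, hsp', Bool.false_eq_true]
      rw [if_neg not_false]
      rw [ih (c :: cur) acc]
      by_cases hc : cur = []
      · subst hc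
        simp [pvHd, pvInitialsW, hsp']
      · have he : cur.isEmpty = false := by simpa [List.isEmpty_iff] using hc
        obtain ⟨d, t', rfl⟩ := List.exists_cons_of_ne_nil hc
        have hlast : (c :: d :: t').getLast? = (d :: t').getLast? := List.getLast?_cons_cons ..
        simp [pvHd, hlast, pvInitialsW, hsp', he]

theorem split₀_char (s : List Char) :
    pvG (PySem.Chars.split₀ s) = pvInitialsW true s := by
  simpa [pvHd, pvG] using split_go_char s [] []

-- the substitution turns the general separator class into whitespace
theorem initialsW_map_sub (s : List Char) : ∀ presep,
    pvInitialsW presep (s.map pvSub) = pvInitials presep s := by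
  induction s with
  | nil => intro presep; simp [pvInitialsW, pvInitials]
  | cons c t ih =>
    intro presep
    have hsep : PySem.Chars.isspace (pvSub c) = pvIsSep c := by
      by_cases h1 : c = '-' <;> by_cases h2 : c = '_' <;>
        simp [pvSub, pvIsSep, h1, h2] <;> subst_vars <;> decide
    have hupper : ¬ pvIsSep c = true → PySem.Chars.upperChar (pvSub c) = PySem.Chars.upperChar c := by
      intro h
      have h1 : c ≠ '-' := by rintro rfl; exact h (by decide)
      have h2 : c ≠ '_' := by rintro rfl; exact h (by decide)
      simp [pvSub, h1, h2]
    by_cases h : pvIsSep c = true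
    · simp [pvInitialsW, pvInitials, hsep, h, ih]
    · have h' : pvIsSep c = false := by simpa using h
      simp [pvInitialsW, pvInitials, hsep, h', hupper h, ih]

-- B's foldl computes pvInitials
theorem foldl_scan (s : List Char) : ∀ (presep : Bool) (acc : List Char),
    (s.foldl pvScanStep (presep, acc)).2.reverse = acc.reverse ++ pvInitials presep s := by
  induction s with
  | nil => intro presep acc; simp [pvInitials]
  | cons c t ih =>
    intro presep acc
    by_cases h : pvIsSep c = true
    · simp [List.foldl_cons, pvScanStep, h, pvInitials, ih]
    · have h' : pvIsSep c = false := by simpa using h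
      cases presep <;>
        simp [List.foldl_cons, pvScanStep, h', pvInitials, ih]

-- A's string-level join equals pvG on the toList side
theorem join_cons (p : String) (ps : List String) :
    (PySem.Str.join "" (p :: ps)).toList = p.toList ++ (PySem.Str.join "" ps).toList := by
  cases ps with
  | nil => simp [PySem.Str.toList_join, PySem.Chars.join, List.intercalate]
  | cons q qs =>
    simp [PySem.Str.toList_join, PySem.Chars.join, List.intercalate]

theorem join_firstUpper (ws : List String) :
    (PySem.Str.join "" ((ws.filter (fun w => w ≠ "")).map pvFirstUpper)).toList
      = pvG (ws.map String.toList) := by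
  induction ws with
  | nil => simp [pvG]
  | cons w t ih =>
    by_cases hw : w = ""
    · subst hw
      have hnil : ("" : String).toList = [] := rfl
      simp only [List.map_cons, hnil, List.filter_cons]
      have h2 : pvG ([] :: t.map String.toList) = pvG (t.map String.toList) := by simp [pvG]
      simpa [h2] using ih
    · have hwt : w.toList ≠ [] := by
        intro h; exact hw (String.toList_inj.mp h)
      obtain ⟨c, r, hcr⟩ := List.exists_cons_of_ne_nil hwt
      have hfu : pvFirstUpper w = String.ofList [PySem.Chars.upperChar c] := by
        simp [pvFirstUpper, hcr, PySem.List.pyGet?, PySem.List.pyIdx?]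
      have h2 : pvG (w.toList :: t.map String.toList)
          = [PySem.Chars.upperChar c] ++ pvG (t.map String.toList) := by
        simp [pvG, hcr]
      simp only [List.map_cons]
      rw [show (List.filter (fun w => w ≠ "") (w :: t)) = w :: List.filter (fun w => w ≠ "") t from by
        simp [hw]]
      rw [List.map_cons, join_cons, hfu, ih, h2]
      simp

theorem strip_empty : PySem.Str.strip "" = "" := by decide

-- ===== VERDICT (by name: the statement is the Claim_ definition above) =====
theorem abbreviate_game_mode_spec : Claim_equal_abbreviate_game_mode := by
  intro game_mode _
  unfold Spec_abbreviate_game_mode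
  match game_mode with
  | none => rfl
  | some gm =>
    simp only [abbreviate_game_mode, abbreviate_game_mode_alt]
    by_cases hs : PySem.Str.strip gm = ""
    · simp [hs]
    · have hgm : ¬ (gm = "" ∨ PySem.Str.strip gm = "") := by
        rintro (rfl | h) <;> [exact hs strip_empty; exact hs h]
      rw [if_neg hgm]
      set s := PySem.Str.strip gm with hsdef
      by_cases hl : PySem.Str.lower s ∈ ["main", "n/a", "none", "-"]
      · rw [if_pos hl, if_pos (Or.inr hl)]
      · rw [if_neg hl, if_neg (show ¬ (s = "" ∨ PySem.Str.lower s ∈ ["main", "n/a", "none", "-"]) by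
          rintro (h | h) <;> [exact hs h; exact hl h])]
        have hrep : (PySem.Str.replace (PySem.Str.replace s "-" " ") "_" " ").toList
            = s.toList.map pvSub := by
          rw [PySem.Str.toList_replace, PySem.Str.toList_replace]
          rw [show ("-" : String).toList = ['-'] from rfl, show ("_" : String).toList = ['_'] from rfl,
             show (" " : String).toList = [' '] from rfl]
          rw [replace_single, replace_single, List.map_map]
          congr 1
          funext c
          by_cases h1 : c = '-' <;> by_cases h2 : c = '_' <;> simp [pvSub, h1, h2]
        have hres : (PySem.Str.join ""
            (((PySem.Str.split₀ (PySem.Str.replace (PySem.Str.replace s "-" " ") "_" " ")).filter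
              (fun w => w ≠ "")).map pvFirstUpper)).toList = pvInitials true s.toList := by
          rw [join_firstUpper, PySem.Str.split₀_map_toList, hrep, split₀_char, initialsW_map_sub]
        have hlet : ((s.toList.foldl pvScanStep (true, [])).2.reverse : List Char)
            = pvInitials true s.toList := by simpa using foldl_scan s.toList true []
        by_cases hz : pvInitials true s.toList = []
        · have h1 : PySem.Str.join "" (((PySem.Str.split₀ (PySem.Str.replace (PySem.Str.replace s "-" " ") "_" " ")).filter (fun w => w ≠ "")).map pvFirstUpper) = "" := by
            apply String.toList_inj.mp; rw [hres, hz]; rfl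
          rw [hlet, if_pos hz]
          by_cases hwords : (PySem.Str.split₀ (PySem.Str.replace (PySem.Str.replace s "-" " ") "_" " ")) = []
          · rw [if_pos hwords]
          · rw [if_neg hwords, if_pos h1]
        · have h1 : PySem.Str.join "" (((PySem.Str.split₀ (PySem.Str.replace (PySem.Str.replace s "-" " ") "_" " ")).filter (fun w => w ≠ "")).map pvFirstUpper) ≠ "" := by
            intro h; apply hz; rw [← hres, h]; rfl
          have hwords : (PySem.Str.split₀ (PySem.Str.replace (PySem.Str.replace s "-" " ") "_" " ")) ≠ [] := by
            intro h
            apply hz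
            rw [← hres]
            simp only [h, List.filter_nil, List.map_nil]
            rfl
          rw [if_neg hwords, if_neg h1, hlet, if_neg hz]
          apply congrArg
          apply String.toList_inj.mp
          rw [String.toList_ofList]
          exact hres
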